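-- pv_equiv track=rewrite | github.com/sgttomas/chirality-piping | tools/reporting/synthesize_domain_coverage_json.py | remediation_rollup
-- ===== SOURCE A (Python) =====
-- def remediation_rollup(rows: list[dict[str, str]]) -> str:
--     states = {row.get("CONTENT_DISPOSITION_STATE", "").strip() for row in rows}
--     gates = {row.get("FACTUAL_USE_GATE", "").strip() for row in rows}
--     if any(not state or state == "PENDING" for state in states):
--         return "PENDING"
--     if "BLOCKED" in states or "BLOCK_FACTUAL_USE" in gates:
--         return "BLOCKED"
--     if "DEFERRED" in states:
--         return "DEFERRED"
--     return "COMPLETE"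
-- ===== SOURCE B (Python) =====
-- LEVELS = ("PENDING", "BLOCKED", "DEFERRED", "COMPLETE")
--
--
-- def _rank(row: dict[str, str]) -> int:
--     """Severity rank of a single row: 0=pending, 1=blocked, 2=deferred, 3=complete."""
--     state = row.get("CONTENT_DISPOSITION_STATE", "").strip()
--     if not state or state == "PENDING":
--         return 0
--     if state == "BLOCKED" or row.get("FACTUAL_USE_GATE", "").strip() == "BLOCK_FACTUAL_USE":
--         return 1
--     if state == "DEFERRED":
--         return 2
--     return 3
--
--
-- def remediation_rollup(rows: list[dict[str, str]]) -> str: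
--     return LEVELS[min(map(_rank, rows), default=3)]
-- ===== Notes on version B (the rewrite author's own statement) =====
-- stated objective: alternative
-- what changed: B replaces A's build-two-sets-then-staged-membership-tests with a rank-and-reduce algorithm: each row is mapped to a numeric severity rank (0=pending, 1=blocked, 2=deferred, 3=complete), the minimum rank is taken (default 3 on empty input), and the result is read off a level table.
import Mathlib
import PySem

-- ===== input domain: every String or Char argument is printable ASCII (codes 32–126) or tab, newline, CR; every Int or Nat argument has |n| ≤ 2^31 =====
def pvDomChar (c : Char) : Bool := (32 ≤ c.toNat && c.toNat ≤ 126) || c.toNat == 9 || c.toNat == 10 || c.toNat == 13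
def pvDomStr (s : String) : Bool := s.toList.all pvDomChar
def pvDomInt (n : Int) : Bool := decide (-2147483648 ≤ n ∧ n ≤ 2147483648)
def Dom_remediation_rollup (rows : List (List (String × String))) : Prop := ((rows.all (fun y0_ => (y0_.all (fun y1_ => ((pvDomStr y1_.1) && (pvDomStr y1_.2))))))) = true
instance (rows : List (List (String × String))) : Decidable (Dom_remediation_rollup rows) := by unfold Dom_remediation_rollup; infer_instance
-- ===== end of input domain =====

-- B replaces A's two-set/staged-membership structure by ranking each row with a numeric severity and taking the minimum rank (objective: alternative algorithm; same O(n) cost).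


-- ===== PORT A =====
-- row.get("CONTENT_DISPOSITION_STATE", "").strip()
def pvStateOf (row : List (String × String)) : String :=
  PySem.Str.strip (PySem.Dict.getD (PySem.Dict.mk row) "CONTENT_DISPOSITION_STATE" "")

-- row.get("FACTUAL_USE_GATE", "").strip()
def pvGateOf (row : List (String × String)) : String :=
  PySem.Str.strip (PySem.Dict.getD (PySem.Dict.mk row) "FACTUAL_USE_GATE" "")

def remediation_rollup (rows : List (List (String × String))) : String :=
  let states : PySem.Set String := PySem.Set.ofList (rows.map pvStateOf)
  let gates : PySem.Set String := PySem.Set.ofList (rows.map pvGateOf)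
  if states.any (fun state => state == "" || state == "PENDING") then "PENDING"
  else if PySem.Set.contains states "BLOCKED" || PySem.Set.contains gates "BLOCK_FACTUAL_USE" then "BLOCKED"
  else if PySem.Set.contains states "DEFERRED" then "DEFERRED"
  else "COMPLETE"

-- ===== PORT B =====
def pvLevels : List String := ["PENDING", "BLOCKED", "DEFERRED", "COMPLETE"]

-- _rank(row): severity rank 0..3 of a single row
def pvRank (row : List (String × String)) : Nat :=
  let state := pvStateOf row
  if state == "" || state == "PENDING" then 0
  else if state == "BLOCKED" || pvGateOf row == "BLOCK_FACTUAL_USE" then 1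
  else if state == "DEFERRED" then 2
  else 3

-- min(map(_rank, rows), default=3); the LEVELS index is always in range (rank ≤ 3), so getD's default is never used
def remediation_rollup_alt (rows : List (List (String × String))) : String :=
  let sev : Nat := match PySem.List.min? (rows.map pvRank) (fun x => x) with
    | some m => m
    | none => 3
  (PySem.List.pyGet? pvLevels (Int.ofNat sev)).getD "COMPLETE"

-- ===== PRECONDITION & SPEC =====
def Spec_remediation_rollup (rows : List (List (String × String))) (out : String) : Prop := out = remediation_rollup_alt rows
instance (rows : List (List (String × String))) (out : String) : Decidable (Spec_remediation_rollup rows out) := by unfold Spec_remediation_rollup; infer_instance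

-- ===== CLAIM (what is proved, stated in full; the proofs are below) =====
def Claim_equal_remediation_rollup : Prop := ∀ (rows : List (List (String × String))), Dom_remediation_rollup rows → Spec_remediation_rollup rows (remediation_rollup rows)

-- ===== LEMMAS AND PROOFS =====
-- row-level predicates matching pvRank's three branches
def pvIsP (r : List (String × String)) : Bool := pvStateOf r == "" || pvStateOf r == "PENDING"
def pvIsB (r : List (String × String)) : Bool := pvStateOf r == "BLOCKED" || pvGateOf r == "BLOCK_FACTUAL_USE"
def pvIsD (r : List (String × String)) : Bool := pvStateOf r == "DEFERRED"

lemma set_any_ofList (l : List String) (p : String → Bool) :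
    (PySem.Set.ofList l).any p = l.any p := by
  apply Bool.eq_iff_iff.mpr
  simp [List.any_eq_true, PySem.Set.mem_ofList]

lemma set_contains_ofList_map (f : List (String × String) → String)
    (rows : List (List (String × String))) (x : String) :
    PySem.Set.contains (PySem.Set.ofList (rows.map f)) x
      = rows.any (fun r => f r == x) := by
  apply Bool.eq_iff_iff.mpr
  simp [PySem.Set.mem_ofList, List.any_eq_true, List.mem_map]

lemma pvRank_eq (r : List (String × String)) :
    pvRank r = if pvIsP r then 0 else if pvIsB r then 1 else if pvIsD r then 2 else 3 := rfl

lemma pvRank_le (r : List (String × String)) : pvRank r ≤ 3 := by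
  rw [pvRank_eq]; split_ifs <;> omega

lemma foldl_min_eq_foldr (x : Nat) (l : List Nat) (hx : x ≤ 3) (hl : ∀ y ∈ l, y ≤ 3) :
    l.foldl min x = min x (l.foldr min 3) := by
  induction l generalizing x with
  | nil => simpa using hx
  | cons y t ih =>
    simp only [List.foldl_cons, List.foldr_cons]
    rw [ih (min x y) (le_trans (min_le_left _ _) hx) (fun z hz => hl z (List.mem_cons_of_mem _ hz))]
    rw [min_assoc]

lemma minrank_char (rows : List (List (String × String))) :
    (rows.map pvRank).foldr min 3
      = if rows.any pvIsP then 0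
        else if rows.any pvIsB then 1
        else if rows.any pvIsD then 2
        else 3 := by
  induction rows with
  | nil => simp
  | cons r rs ih =>
    simp only [List.map_cons, List.foldr_cons, List.any_cons, ih]
    rw [pvRank_eq]
    by_cases hp : pvIsP r = true <;> by_cases hb : pvIsB r = true <;> by_cases hd : pvIsD r = true <;>
      by_cases hp' : rs.any pvIsP = true <;> by_cases hb' : rs.any pvIsB = true <;>
      by_cases hd' : rs.any pvIsD = true <;>
      simp_all <;> first
        | omega
        | (split_ifs <;> simp_all)

lemma sev_char (rows : List (List (String × String))) :
    (match PySem.List.min? (rows.map pvRank) (fun x => x) with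
      | some m => m
      | none => 3)
      = if rows.any pvIsP then 0
        else if rows.any pvIsB then 1
        else if rows.any pvIsD then 2
        else 3 := by
  rw [← minrank_char]
  cases rows with
  | nil => rfl
  | cons r rs =>
    simp only [List.map_cons, PySem.List.min?_id_cons]
    rw [foldl_min_eq_foldr (pvRank r) (rs.map pvRank) (pvRank_le r)
      (by intro y hy; rcases List.mem_map.mp hy with ⟨z, _, rfl⟩; exact pvRank_le z)]
    simp [List.foldr_cons]

lemma any_isP_eq (rows : List (List (String × String))) :
    rows.any pvIsP = rows.any (fun r => pvStateOf r == "" || pvStateOf r == "PENDING") := rfl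

lemma any_isD_eq (rows : List (List (String × String))) :
    rows.any pvIsD = rows.any (fun r => pvStateOf r == "DEFERRED") := rfl

lemma any_isB (rows : List (List (String × String))) :
    rows.any pvIsB
      = (rows.any (fun r => pvStateOf r == "BLOCKED") || rows.any (fun r => pvGateOf r == "BLOCK_FACTUAL_USE")) := by
  apply Bool.eq_iff_iff.mpr
  simp only [List.any_eq_true, pvIsB, Bool.or_eq_true]
  constructor
  · rintro ⟨r, hr, h | h⟩
    · exact Or.inl ⟨r, hr, h⟩
    · exact Or.inr ⟨r, hr, h⟩
  · rintro (⟨r, hr, h⟩ | ⟨r, hr, h⟩) <;> exact ⟨r, hr, by simp [h]⟩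

-- ===== VERDICT (by name: the statement is the Claim_ definition above) =====
theorem remediation_rollup_spec : Claim_equal_remediation_rollup := by
  intro rows _
  unfold Spec_remediation_rollup remediation_rollup remediation_rollup_alt
  simp only [sev_char, set_any_ofList, set_contains_ofList_map, List.any_map,
    Function.comp_def, any_isB, any_isP_eq, any_isD_eq]
  split_ifs <;> rfl
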